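-- pv_equiv track=rewrite | github.com/iliketocode2/Smart-Motors | final_websocket/final/websocket_manager.py | _extract_angle_from_text
-- ===== SOURCE A (Python) =====
-- def _extract_angle_from_text(text):
--     """Quickly extract angle value from text"""
--     try:
--         # Look for "value": followed by a number
--         value_pos = text.find('"value":')
--         if value_pos != -1:
--             # Find the number after "value":
--             start = value_pos + 8  # Length of "value":
--             end = start
--
--             # Skip whitespace and potential quotes
--             while end < len(text) and text[end] in ' "':
--                 end += 1
--
--             # Extract digits
--             num_start = end
--             while end < len(text) and (text[end].isdigit() or text[end] == '.'):
--                 end += 1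
--
--             if end > num_start:
--                 angle_str = text[num_start:end]
--                 return int(float(angle_str))
--
--     except Exception as e:
--         pass
--
--     return None
-- ===== SOURCE B (Python) =====
-- def _extract_angle_from_text(text):
--     """Quickly extract angle value from text"""
--     marker = list('"value":')
--     state = 0          # 0 = searching (rolling window), 1 = skipping ' "', 2 = collecting number
--     window = []
--     digits = []
--     for ch in text:
--         if state == 0:
--             window.append(ch)
--             if len(window) > 8:
--                 window.pop(0)
--             if window == marker:
--                 state = 1
--         elif state == 1:
--             if ch in ' "':
--                 continue
--             elif ch.isdigit() or ch == '.':
--                 digits.append(ch)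
--                 state = 2
--             else:
--                 return None
--         else:
--             if ch.isdigit() or ch == '.':
--                 digits.append(ch)
--             else:
--                 break
--     if not digits:
--         return None
--     try:
--         return int(float(''.join(digits)))
--     except (ValueError, OverflowError):
--         return None
-- ===== Notes on version B (the rewrite author's own statement) =====
-- stated objective: alternative
-- what changed: Replaces A's staged find()+two index-advancing while loops with a single for-loop streaming state machine: a rolling 8-char window detects the first occurrence of '"value":' on the fly, then the same loop switches to skip-blanks and collect-digits states, finally int(float(...)) as in A.
import Mathlib
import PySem

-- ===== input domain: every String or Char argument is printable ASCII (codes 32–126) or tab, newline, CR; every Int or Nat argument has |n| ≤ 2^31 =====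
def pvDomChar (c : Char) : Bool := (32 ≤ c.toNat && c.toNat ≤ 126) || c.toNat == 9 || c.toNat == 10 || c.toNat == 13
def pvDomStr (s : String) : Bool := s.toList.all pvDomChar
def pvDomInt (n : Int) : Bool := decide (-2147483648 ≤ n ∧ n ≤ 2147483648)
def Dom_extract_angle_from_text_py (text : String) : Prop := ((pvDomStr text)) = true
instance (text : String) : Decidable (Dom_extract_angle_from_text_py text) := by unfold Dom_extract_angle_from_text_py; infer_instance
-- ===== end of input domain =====

-- B replaces A's staged find() + two index-advancing while loops with one streaming state machine
-- (rolling 8-char window to spot '"value":', then skip/collect states in the same pass); alternative, not faster.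
-- Both Pythons end in int(float(num)); pyIntFloat? below is a shared exact integer-arithmetic model of that
-- (correctly-rounded decimal→IEEE-754-double, then truncation; none exactly where Python raises ValueError/OverflowError).

-- exact model of Python's int(float(s)) for a nonempty string of ASCII digits and dots
-- (CPython's float() is correctly rounded to nearest/even binary64; int() truncates; inf → OverflowError → none)
def pyIntFloat? (s : List Char) : Option Int :=
  if s.count '.' > 1 then none else
  let digits := s.filter (fun c => c ≠ '.')
  if digits.isEmpty then none else
  let f : Nat := (s.dropWhile (fun c => c ≠ '.')).length - 1
  let N : Nat := digits.foldl (fun a c => a * 10 + (c.toNat - 48)) 0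
  let D : Nat := 10 ^ f
  if N = 0 then some 0
  else if 2 * N < D then some 0
  else
    let g : Int := (Nat.log2 N : Int) - (Nat.log2 D : Int)
    let ge : Bool := if 0 ≤ g then decide (D <<< g.toNat ≤ N) else decide (D ≤ N <<< (-g).toNat)
    let e : Int := if ge then g else g - 1
    let k : Int := 52 - e
    let Nm : Nat := if 0 ≤ k then N <<< k.toNat else N
    let Dm : Nat := if 0 ≤ k then D else D <<< (-k).toNat
    let m0 : Nat := Nm / Dm
    let r : Nat := Nm % Dm
    let m : Nat := if Dm < 2 * r ∨ (2 * r = Dm ∧ m0 % 2 = 1) then m0 + 1 else m0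
    let m' : Nat := if m = 2 ^ 53 then 2 ^ 52 else m
    let e' : Int := if m = 2 ^ 53 then e + 1 else e
    if 1023 < e' then none
    else if e' ≤ 52 then some ((m' >>> (52 - e').toNat : Nat) : Int)
    else some ((m' <<< (e' - 52).toNat : Nat) : Int)

-- ===== PORT A =====
-- the two index-advancing while loops of A, as one generic index walker
def pvSkipIdx (p : Char → Bool) (cs : List Char) (i : Nat) : Nat :=
  if h : i < cs.length then
    if p cs[i] then pvSkipIdx p cs (i + 1) else i
  else i
termination_by cs.length - i

def extract_angle_from_text_py (text : String) : Option Int :=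
  let cs := text.toList
  let value_pos := PySem.Chars.find cs "\"value\":".toList
  if value_pos ≠ -1 then
    let start := (value_pos + 8).toNat
    -- while end < len(text) and text[end] in ' "': end += 1
    let end1 := pvSkipIdx (fun c => c == ' ' || c == '"') cs start
    let num_start := end1
    -- while end < len(text) and (text[end].isdigit() or text[end] == '.'): end += 1
    let end2 := pvSkipIdx (fun c => PySem.Chars.isdigit c || c == '.') cs end1
    if num_start < end2 then
      pyIntFloat? (PySem.List.slice cs (some (num_start : Int)) (some (end2 : Int)))
    else none
  else none

-- ===== PORT B =====
-- B is one for-loop with three states; each state is one tail-recursive helper, the tail calls are the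
-- state transitions (state 0 = pvSearchB with its rolling window, state 1 = pvSkipB, state 2 = pvCollectB).
def pvCollectB (cs : List Char) (digits : List Char) : List Char :=
  match cs with
  | [] => digits
  | c :: rest =>
    if PySem.Chars.isdigit c || c == '.' then pvCollectB rest (digits ++ [c]) else digits

def pvSkipB (cs : List Char) : Option (List Char) :=
  match cs with
  | [] => some []
  | c :: rest =>
    if c == ' ' || c == '"' then pvSkipB rest
    else if PySem.Chars.isdigit c || c == '.' then some (pvCollectB rest [c])
    else none

def pvSearchB (cs : List Char) (window : List Char) : Option (List Char) :=
  match cs with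
  | [] => some []
  | c :: rest =>
    let u := window ++ [c]
    let w := if 8 < u.length then u.tail else u
    if w = "\"value\":".toList then pvSkipB rest else pvSearchB rest w

def extract_angle_from_text_py_alt (text : String) : Option Int :=
  match pvSearchB text.toList [] with
  | none => none
  | some digits => if digits.isEmpty then none else pyIntFloat? digits

-- ===== PRECONDITION & SPEC =====
def Spec_extract_angle_from_text_py (text : String) (out : Option Int) : Prop := out = extract_angle_from_text_py_alt text
instance (text : String) (out : Option Int) : Decidable (Spec_extract_angle_from_text_py text out) := by unfold Spec_extract_angle_from_text_py; infer_instance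

-- ===== CLAIM (what is proved, stated in full; the proofs are below) =====
def Claim_equal_extract_angle_from_text_py : Prop := ∀ (text : String), Dom_extract_angle_from_text_py text → Spec_extract_angle_from_text_py text (extract_angle_from_text_py text)

-- ===== LEMMAS AND PROOFS =====

-- the index walker is "advance past the takeWhile prefix"
theorem pvSkipIdx_eq (p : Char → Bool) (cs : List Char) (i : Nat) :
    pvSkipIdx p cs i = i + ((cs.drop i).takeWhile p).length := by
  fun_induction pvSkipIdx p cs i with
  | case1 i h hp ih =>
      rw [ih, List.drop_eq_getElem_cons h, List.takeWhile_cons, hp]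
      simp; omega
  | case2 i h hp =>
      rw [List.drop_eq_getElem_cons h, List.takeWhile_cons]
      simp [hp]
  | case3 i h =>
      rw [List.drop_eq_nil_of_le (by omega)]
      simp

theorem pv_dropWhile_eq_drop (p : Char → Bool) (l : List Char) :
    l.dropWhile p = l.drop (l.takeWhile p).length := by
  set a := l.takeWhile p with ha
  set b := l.dropWhile p with hb
  rw [show l = a ++ b from (List.takeWhile_append_dropWhile).symm, List.drop_left]

theorem pv_take_takeWhile (p : Char → Bool) (l : List Char) :
    l.take (l.takeWhile p).length = l.takeWhile p := by
  set a := l.takeWhile p with ha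
  set b := l.dropWhile p with hb
  rw [show l = a ++ b from (List.takeWhile_append_dropWhile).symm, List.take_left]

-- state 2: collecting equals takeWhile
theorem pvCollectB_eq (cs digits : List Char) :
    pvCollectB cs digits = digits ++ cs.takeWhile (fun c => PySem.Chars.isdigit c || c == '.') := by
  induction cs generalizing digits with
  | nil => simp [pvCollectB]
  | cons c rest ih =>
      rw [pvCollectB, List.takeWhile_cons]
      by_cases hp : (PySem.Chars.isdigit c || c == '.') = true
      · rw [if_pos hp, if_pos hp, ih]; simp
      · rw [if_neg hp, if_neg hp]; simp

-- states 1+2 together: dropWhile the blanks, then takeWhile the digit run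
theorem pvSkipB_eq (cs : List Char) :
    pvSkipB cs =
      (if ((cs.dropWhile (fun c => c == ' ' || c == '"')).takeWhile
              (fun c => PySem.Chars.isdigit c || c == '.')).isEmpty
       then (if (cs.dropWhile (fun c => c == ' ' || c == '"')).isEmpty then some [] else none)
       else some ((cs.dropWhile (fun c => c == ' ' || c == '"')).takeWhile
              (fun c => PySem.Chars.isdigit c || c == '.'))) := by
  induction cs with
  | nil => simp [pvSkipB]
  | cons c rest ih =>
      rw [pvSkipB, List.dropWhile_cons]
      by_cases hA : (c == ' ' || c == '"') = true
      · rw [if_pos hA, if_pos hA, ih]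
      · rw [if_neg hA, if_neg hA, List.takeWhile_cons]
        by_cases hD : (PySem.Chars.isdigit c || c == '.') = true
        · rw [if_pos hD, if_pos hD, if_neg (by simp), pvCollectB_eq]
          simp
        · rw [if_neg hD, if_neg hD, if_pos (by simp), if_neg (by simp)]

-- one step of the rolling window keeps the last ≤8 chars of the processed prefix
theorem pvWindowStep (pre : List Char) (c : Char) :
    (if 8 < ((pre.drop (pre.length - 8)) ++ [c]).length
     then ((pre.drop (pre.length - 8)) ++ [c]).tail
     else (pre.drop (pre.length - 8)) ++ [c])
    = (pre ++ [c]).drop ((pre ++ [c]).length - 8) := by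
  have hl : (pre ++ [c]).length = pre.length + 1 := by simp
  by_cases h8 : pre.length < 8
  · rw [if_neg (by
        simp only [List.length_append, List.length_drop, List.length_cons, List.length_nil]
        omega)]
    rw [show pre.length - 8 = 0 from by omega, hl,
        show pre.length + 1 - 8 = 0 from by omega]
    simp
  · rw [if_pos (by
        simp only [List.length_append, List.length_drop, List.length_cons, List.length_nil]
        omega)]
    rw [List.tail_append_of_ne_nil (by
          intro hnil
          have := congrArg List.length hnil
          simp at this; omega),
        List.tail_drop, hl,
        List.drop_append_of_le_length (show pre.length + 1 - 8 ≤ pre.length from by omega)]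
    congr 2
    omega

-- state 0, no occurrence anywhere: the window never matches
theorem pvSearchB_go_none (cs : List Char) : ∀ (pre s : List Char), s = pre ++ cs →
    (∀ j, ¬ ("\"value\":".toList <+: s.drop j)) →
    pvSearchB cs (pre.drop (pre.length - 8)) = some [] := by
  induction cs with
  | nil => intro pre s _ _; rfl
  | cons c rest ih =>
      intro pre s hs hno
      have hsl : s = (pre ++ [c]) ++ rest := by rw [hs]; simp
      have hw' := pvWindowStep pre c
      rw [pvSearchB]
      rw [hw']
      have hmatch : ¬ ((pre ++ [c]).drop ((pre ++ [c]).length - 8) = "\"value\":".toList) := by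
        intro hm
        have h8 : 8 ≤ (pre ++ [c]).length := by
          have := congrArg List.length hm
          rw [List.length_drop] at this
          simp at this ⊢; omega
        apply hno ((pre ++ [c]).length - 8)
        rw [hsl, List.drop_append_of_le_length (by omega), hm]
        exact ⟨rest, rfl⟩
      rw [if_neg hmatch]
      exact ih (pre ++ [c]) s hsl hno

-- state 0, first occurrence at j0: the window first matches there, then the skip state takes over
theorem pvSearchB_go_found (cs : List Char) : ∀ (pre s : List Char) (j0 : Nat), s = pre ++ cs →
    (∀ j, j + 8 ≤ pre.length → ¬ ("\"value\":".toList <+: s.drop j)) →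
    ("\"value\":".toList <+: s.drop j0) →
    (∀ i, i < j0 → ¬ ("\"value\":".toList <+: s.drop i)) →
    pvSearchB cs (pre.drop (pre.length - 8)) = pvSkipB (s.drop (j0 + 8)) := by
  induction cs with
  | nil =>
      intro pre s j0 hs hocc hj0 _
      exfalso
      have hlen := hj0.length_le
      simp at hlen
      have hsl : s.length = pre.length := by rw [hs]; simp
      exact hocc j0 (by omega) hj0
  | cons c rest ih =>
      intro pre s j0 hs hocc hj0 hmin
      have hsl : s = (pre ++ [c]) ++ rest := by rw [hs]; simp
      have hw' := pvWindowStep pre c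
      rw [pvSearchB]
      rw [hw']
      by_cases hmatch : (pre ++ [c]).drop ((pre ++ [c]).length - 8) = "\"value\":".toList
      · rw [if_pos hmatch]
        have h8 : 8 ≤ (pre ++ [c]).length := by
          have := congrArg List.length hmatch
          rw [List.length_drop] at this
          simp at this ⊢; omega
        have hjm : ("\"value\":".toList <+: s.drop ((pre ++ [c]).length - 8)) := by
          rw [hsl, List.drop_append_of_le_length (by omega), hmatch]
          exact ⟨rest, rfl⟩
        have hj0eq : j0 = (pre ++ [c]).length - 8 := by
          have h1 : ¬ (pre ++ [c]).length - 8 < j0 := fun hlt => hmin _ hlt hjm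
          have h2 : ¬ j0 + 8 ≤ pre.length := fun hle => hocc j0 hle hj0
          simp at h1 h2 ⊢; omega
        rw [hj0eq, show (pre ++ [c]).length - 8 + 8 = (pre ++ [c]).length by omega,
            hsl, List.drop_append, List.drop_of_length_le (le_refl _)]
        simp
      · rw [if_neg hmatch]
        refine ih (pre ++ [c]) s j0 hsl ?_ hj0 hmin
        intro j hj hoccj
        by_cases hje : j + 8 ≤ pre.length
        · exact hocc j hje hoccj
        · have h8 : 8 ≤ (pre ++ [c]).length := by simp at hj ⊢; omega
          have hjeq : j = (pre ++ [c]).length - 8 := by simp at hj ⊢; omega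
          subst hjeq
          have hdropj : s.drop ((pre ++ [c]).length - 8)
              = (pre ++ [c]).drop ((pre ++ [c]).length - 8) ++ rest := by
            rw [hsl, List.drop_append_of_le_length (by omega)]
          obtain ⟨t, ht⟩ := hoccj
          rw [hdropj] at ht
          have hlenw : ((pre ++ [c]).drop ((pre ++ [c]).length - 8)).length = 8 := by
            rw [List.length_drop]; omega
          have h2 := congrArg (List.take 8) ht
          rw [List.take_append_of_le_length (by decide),
              List.take_append_of_le_length (by omega),
              List.take_of_length_le (by decide : ("\"value\":".toList).length ≤ 8),
              List.take_of_length_le (by omega)] at h2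
          exact hmatch h2.symm

-- the first window match is at PySem.Chars.find
theorem pvSearchB_find (cs : List Char) :
    pvSearchB cs [] =
      if PySem.Chars.find cs "\"value\":".toList = -1 then some []
      else pvSkipB (cs.drop ((PySem.Chars.find cs "\"value\":".toList).toNat + 8)) := by
  by_cases hf : PySem.Chars.find cs "\"value\":".toList = -1
  · rw [if_pos hf]
    have hni : ¬ ("\"value\":".toList <:+: cs) := (PySem.Chars.find_eq_neg_one_iff cs _).mp hf
    have hno : ∀ j, ¬ ("\"value\":".toList <+: cs.drop j) := by
      intro j hj
      exact absurd ((PySem.Chars.isIn_iff_infix _ cs).mp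
        ((PySem.Chars.exists_prefix_drop_iff_isIn _ cs).mp ⟨j, hj⟩)) hni
    have h := pvSearchB_go_none cs [] cs (by simp) hno
    simpa using h
  · rw [if_neg hf]
    have hpos : 0 ≤ PySem.Chars.find cs "\"value\":".toList := by
      have := PySem.Chars.neg_one_le_find cs "\"value\":".toList
      omega
    obtain ⟨hp, hmin⟩ := PySem.Chars.find_spec (s := cs) (sub := "\"value\":".toList) hpos
    have h := pvSearchB_go_found cs [] cs
      (PySem.Chars.find cs "\"value\":".toList).toNat (by simp) (by intro j hj; simp at hj)
      hp hmin
    exact h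

-- ===== VERDICT (by name: the statement is the Claim_ definition above) =====
theorem extract_angle_from_text_py_spec : Claim_equal_extract_angle_from_text_py := by
  intro text _hdom
  unfold Spec_extract_angle_from_text_py extract_angle_from_text_py extract_angle_from_text_py_alt
  rw [pvSearchB_find]
  set cs := text.toList with hcs
  set pat := "\"value\":".toList with hpat
  simp only [ne_eq, ite_not]
  by_cases hf : PySem.Chars.find cs pat = -1
  · rw [if_pos hf, if_pos hf]
    simp
  · rw [if_neg hf, if_neg hf]
    have hnn : 0 ≤ PySem.Chars.find cs pat := by
      have := PySem.Chars.neg_one_le_find cs pat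
      omega
    set pA : Char → Bool := fun c => c == ' ' || c == '\"' with hpA
    set pD : Char → Bool := fun c => PySem.Chars.isdigit c || c == '.' with hpD
    have hstart : (PySem.Chars.find cs pat + 8).toNat = (PySem.Chars.find cs pat).toNat + 8 := by
      omega
    set t := (PySem.Chars.find cs pat).toNat with ht
    rw [hstart, pvSkipIdx_eq, pvSkipIdx_eq, pvSkipB_eq]
    set rest := cs.drop (t + 8) with hrest
    set a := (rest.takeWhile pA).length with haa
    have hbody : cs.drop (t + 8 + a) = rest.dropWhile pA := by
      rw [pv_dropWhile_eq_drop, hrest, List.drop_drop, ← haa]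
    rw [hbody]
    set body := rest.dropWhile pA with hbody2
    set d := (body.takeWhile pD).length with hd
    have hslice : PySem.List.slice cs (some ((t + 8 + a : Nat) : Int))
        (some ((t + 8 + a + d : Nat) : Int)) = body.takeWhile pD := by
      rw [PySem.List.slice_natCast, hbody, show t + 8 + a + d - (t + 8 + a) = d from by omega, hd]
      exact pv_take_takeWhile pD body
    by_cases hz : d = 0
    · have hemp : (body.takeWhile pD).isEmpty = true := by
        rw [List.isEmpty_iff_length_eq_zero, ← hd, hz]
      rw [if_neg (by omega), if_pos hemp]
      by_cases hbe : body.isEmpty = true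
      · rw [if_pos hbe]; simp
      · rw [if_neg hbe]
    · have hemp : ¬ (body.takeWhile pD).isEmpty = true := by
        rw [List.isEmpty_iff_length_eq_zero, ← hd]; exact hz
      rw [if_pos (by omega), if_neg hemp, hslice]
      obtain ⟨x, xs, htw⟩ : ∃ x xs, body.takeWhile pD = x :: xs := by
        cases hIs : body.takeWhile pD with
        | nil => exact absurd (by rw [hIs]; rfl) hemp
        | cons x xs => exact ⟨x, xs, rfl⟩
      rw [htw]
      simp
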